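-- pv_equiv track=rewrite | github.com/tcdejong/mpmp | mpmp17-cats-and-dogs/cats-and-dogs.py | convert_to_path
-- ===== SOURCE A (Python) =====
-- CAT = True
--
-- def convert_to_path(recursive_result: list) -> list:
--     """
--     Convert a list (in which True represents placing a cat and False a dog)
--     to a list of coordinates in a cat-dog grid, where a step along the
--     cat axis represents placing a cat and a step along the dog axis
--     represents placing a dog. Obviously.
--     """
--     x_dog = 0
--     y_cat = 0
--
--     path = [None for _ in recursive_result]
--
--     for index, animal in enumerate(recursive_result):
--         if animal == CAT:
--             y_cat += 1
--         else:
--             x_dog += 1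
--
--         coord = (x_dog, y_cat)
--         path[index] = coord
--
--     return [(0,0), *path]
-- ===== SOURCE B (Python) =====
-- def convert_to_path(recursive_result: list) -> list:
--     # Build the path BACK-TO-FRONT: start from the final totals and walk
--     # the choices in reverse, subtracting each step, then reverse once.
--     cats = sum(1 for animal in recursive_result if animal == True)
--     x, y = len(recursive_result) - cats, cats
--     path = []
--     for animal in reversed(recursive_result):
--         path.append((x, y))
--         if animal == True:
--             y -= 1
--         else:
--             x -= 1
--     path.append((0, 0))
--     path.reverse()
--     return path
-- ===== Notes on version B (the rewrite author's own statement) =====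
-- stated objective: alternative
-- what changed: Instead of accumulating counters forward, B first computes the final totals and then builds the path back-to-front, walking the choices in reverse and subtracting each step, reversing the list once at the end.
import Mathlib
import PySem

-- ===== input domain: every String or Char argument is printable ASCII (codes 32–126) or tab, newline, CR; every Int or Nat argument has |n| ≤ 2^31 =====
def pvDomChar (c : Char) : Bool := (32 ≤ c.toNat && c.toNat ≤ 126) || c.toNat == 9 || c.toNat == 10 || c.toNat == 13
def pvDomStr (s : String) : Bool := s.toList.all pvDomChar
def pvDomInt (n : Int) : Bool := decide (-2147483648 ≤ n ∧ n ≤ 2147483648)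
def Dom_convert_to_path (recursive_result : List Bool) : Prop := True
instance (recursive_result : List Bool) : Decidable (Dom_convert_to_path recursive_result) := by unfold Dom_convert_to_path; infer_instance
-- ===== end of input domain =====

-- B builds the path back-to-front from the final totals (alternative construction; same cost).
-- ===== PORT A =====
-- loop body: per element bump y_cat (cat) or x_dog (dog), record (x_dog, y_cat)
def pvALoop (x_dog y_cat : Int) : List Bool → List (Int × Int)
  | [] => []
  | animal :: rest =>
    let x' := if animal then x_dog else x_dog + 1
    let y' := if animal then y_cat + 1 else y_cat
    (x', y') :: pvALoop x' y' rest

def convert_to_path (recursive_result : List Bool) : List (Int × Int) :=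
  (0, 0) :: pvALoop 0 0 recursive_result

-- ===== PORT B =====
-- sum(1 for animal in recursive_result if animal == True)
def pvCats : List Bool → Int
  | [] => 0
  | animal :: rest => (if animal then 1 else 0) + pvCats rest

-- B's reverse loop: append current totals, subtract this animal's step
def pvBStep (st : List (Int × Int) × Int × Int) (animal : Bool) : List (Int × Int) × Int × Int :=
  let (path, x, y) := st
  let path := path ++ [(x, y)]
  if animal then (path, x, y - 1) else (path, x - 1, y)

def convert_to_path_alt (recursive_result : List Bool) : List (Int × Int) :=
  let cats := pvCats recursive_result
  let x := (recursive_result.length : Int) - cats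
  let y := cats
  let st := recursive_result.reverse.foldl pvBStep ([], x, y)
  (st.1 ++ [(0, 0)]).reverse

-- ===== PRECONDITION & SPEC =====
def Spec_convert_to_path (recursive_result : List Bool) (out : List (Int × Int)) : Prop := out = convert_to_path_alt recursive_result
instance (recursive_result : List Bool) (out : List (Int × Int)) : Decidable (Spec_convert_to_path recursive_result out) := by unfold Spec_convert_to_path; infer_instance

-- ===== CLAIM =====
def Claim_equal_convert_to_path : Prop := ∀ (recursive_result : List Bool), Dom_convert_to_path recursive_result → Spec_convert_to_path recursive_result (convert_to_path recursive_result)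

-- ===== LEMMAS AND PROOFS =====

-- number of dog steps
def pvDogs : List Bool → Int
  | [] => 0
  | animal :: rest => (if animal then 0 else 1) + pvDogs rest

lemma pvCats_add_pvDogs (rs : List Bool) : pvCats rs + pvDogs rs = (rs.length : Int) := by
  induction rs with
  | nil => rfl
  | cons a t ih => cases a <;> simp [pvCats, pvDogs] <;> omega

lemma pvBLoop_eq (rs : List Bool) : ∀ (p : List (Int × Int)) (x y : Int),
    rs.reverse.foldl pvBStep (p, x, y) =
      (p ++ (pvALoop (x - pvDogs rs) (y - pvCats rs) rs).reverse, x - pvDogs rs, y - pvCats rs) := by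
  induction rs with
  | nil => intro p x y; simp [pvALoop, pvDogs, pvCats]
  | cons a t ih =>
    intro p x y
    have h1 : (a :: t).reverse = t.reverse ++ [a] := by simp
    rw [h1, List.foldl_append, ih]
    cases a <;> simp [pvBStep, pvALoop, pvDogs, pvCats] <;>
      exact ⟨⟨by congr 1 <;> omega, by omega⟩, by omega⟩

-- ===== VERDICT =====
theorem convert_to_path_spec : Claim_equal_convert_to_path := by
  intro rs _
  unfold Spec_convert_to_path convert_to_path convert_to_path_alt
  have h := pvBLoop_eq rs [] ((rs.length : Int) - pvCats rs) (pvCats rs)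
  have hd : (rs.length : Int) - pvCats rs - pvDogs rs = 0 := by
    have := pvCats_add_pvDogs rs; omega
  simp [h, hd]
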